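-- pv_equiv track=rewrite | github.com/parbol/TopPlusDMRunIILegacy | neuralNetwork/runMVA.py | splitByProcess
-- ===== SOURCE A (Python) =====
-- def splitByProcess(inputFiles, test = False, background = False):
--     processes = [] #List of dictionnaries with the different processes as keys and a list of files as values
--
--     for inputFile in inputFiles:
--         #process = "_".join(inputFile.split("_")[1:5]) #TODO: try to find a better way to estimate the process?
--         start = "nanoLatino_"
--         end = "__part"
--         process = inputFile[inputFile.find(start)+len(start):inputFile.rfind(end)].replace('_ext', '')
--
--         #However, at least for now, let's group all the background processes if the option is set
--         if background:
--             process = 'backgrounds'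
--         else: #Only group the single top process together
--             if 'ST' in process: process = 'ST'
--
--         alreadyFound = [i for i, d in enumerate(processes) if process in d.keys()]
--         if len(alreadyFound) == 0:
--             processes.append({process: [inputFile]})
--         else:
--             if not test or len(processes[alreadyFound[0]][process]) < 30:
--                 processes[alreadyFound[0]][process].append(inputFile)
--
--     return processes
-- ===== SOURCE B (Python) =====
-- def _processOf(inputFile, background):
--     start = "nanoLatino_"
--     end = "__part"
--     process = inputFile[inputFile.find(start)+len(start):inputFile.rfind(end)].replace('_ext', '')
--     if background:
--         return 'backgrounds'
--     if 'ST' in process: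
--         return 'ST'
--     return process
--
-- def splitByProcess(inputFiles, test = False, background = False):
--     # Staged, non-incremental algorithm: (1) map every file to its process name,
--     # (2) compute the list of distinct processes in first-appearance order,
--     # (3) for each distinct process, collect its files by filtering the flat
--     #     (file, process) pairs, truncated to the cap.
--     procs = [_processOf(f, background) for f in inputFiles]
--     order = []
--     for p in procs:
--         if p not in order:
--             order.append(p)
--     limit = 30 if test else len(inputFiles)
--     return [{p: [f for f, q in zip(inputFiles, procs) if q == p][:limit]} for p in order]
-- ===== Notes on version B (the rewrite author's own statement) =====
-- stated objective: alternative
-- what changed: Replaces A's single incremental pass (list of singleton dicts updated in place, with the 30-cap decided per append) by a staged map/dedup/group-by: map each file to its process, list the distinct processes in first-appearance order, then build each group by filtering the (file, process) pairs and truncating to the cap once with a slice.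
import Mathlib
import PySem

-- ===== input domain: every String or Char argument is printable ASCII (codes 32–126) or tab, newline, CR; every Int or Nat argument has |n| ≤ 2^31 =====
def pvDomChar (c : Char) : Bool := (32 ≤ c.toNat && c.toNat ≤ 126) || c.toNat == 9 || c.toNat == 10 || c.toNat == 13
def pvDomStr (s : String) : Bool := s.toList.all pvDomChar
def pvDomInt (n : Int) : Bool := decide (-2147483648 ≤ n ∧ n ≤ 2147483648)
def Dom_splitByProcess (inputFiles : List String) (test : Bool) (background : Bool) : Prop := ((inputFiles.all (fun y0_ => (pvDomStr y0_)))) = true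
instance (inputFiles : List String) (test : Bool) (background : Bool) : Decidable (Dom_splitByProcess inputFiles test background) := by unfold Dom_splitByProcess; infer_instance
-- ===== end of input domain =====

-- B replaces A's incremental grouping pass by a staged map / dedup / per-process filter
-- decomposition (alternative algorithm, similar cost).


-- ===== PORT A =====
def splitByProcess (inputFiles : List String) (test : Bool) (background : Bool) : List (List (String × List String)) :=
  inputFiles.foldl (fun processes inputFile =>
    let pstart := "nanoLatino_"
    let pend := "__part"
    let process := PySem.Str.replace
      (PySem.Str.slice inputFile
        (some (PySem.Str.find inputFile pstart + (PySem.Str.len pstart : Int)))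
        (some (PySem.Str.rfind inputFile pend))) "_ext" ""
    let process := if background then "backgrounds"
      else if PySem.Str.isIn "ST" process then "ST" else process
    let alreadyFound := ((PySem.List.enumerate processes).filter
        (fun p => (PySem.Dict.mk p.2).contains process)).map (·.1)
    if alreadyFound.length == 0 then
      processes ++ [[(process, [inputFile])]]
    else
      let i := PySem.List.pyGetD alreadyFound 0 0
      if !test || ((PySem.Dict.mk (PySem.List.pyGetD processes i [])).getD process []).length < 30 then
        PySem.List.pySetD processes i
          (((PySem.Dict.mk (PySem.List.pyGetD processes i [])).modify process []
            (fun fs => fs ++ [inputFile])).items)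
      else processes) []

-- ===== PORT B =====
-- helper _processOf of Source B
def pvProcOf (inputFile : String) (background : Bool) : String :=
  let pstart := "nanoLatino_"
  let pend := "__part"
  let process := PySem.Str.replace
    (PySem.Str.slice inputFile
      (some (PySem.Str.find inputFile pstart + (PySem.Str.len pstart : Int)))
      (some (PySem.Str.rfind inputFile pend))) "_ext" ""
  if background then "backgrounds"
  else if PySem.Str.isIn "ST" process then "ST" else process

-- Source B: map to processes, distinct processes in first-appearance order, then one filter
-- (over the zipped (file, process) pairs) per distinct process, sliced to the cap
def splitByProcess_alt (inputFiles : List String) (test : Bool) (background : Bool) : List (List (String × List String)) :=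
  let procs := inputFiles.map (fun f => pvProcOf f background)
  let order := procs.foldl (fun acc p => if acc.contains p then acc else acc ++ [p]) []
  let limit : Int := if test then 30 else (inputFiles.length : Int)
  order.map (fun p =>
    [(p, PySem.List.slice (((inputFiles.zip procs).filter (fun fq => fq.2 == p)).map Prod.fst)
        none (some limit))])

-- ===== PRECONDITION & SPEC =====
def Spec_splitByProcess (inputFiles : List String) (test : Bool) (background : Bool) (out : List (List (String × List String))) : Prop := out = splitByProcess_alt inputFiles test background
instance (inputFiles : List String) (test : Bool) (background : Bool) (out : List (List (String × List String))) : Decidable (Spec_splitByProcess inputFiles test background out) := by unfold Spec_splitByProcess; infer_instance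

-- ===== CLAIM (what is proved, stated in full; the proofs are below) =====
def Claim_equal_splitByProcess : Prop := ∀ (inputFiles : List String) (test : Bool) (background : Bool), Dom_splitByProcess inputFiles test background → Spec_splitByProcess inputFiles test background (splitByProcess inputFiles test background)

-- ===== LEMMAS AND PROOFS =====

-- proof-side aliases (definitional)
def pvCap (test : Bool) (fs : List String) : List String := if test then fs.take 30 else fs
def pvWrap (test : Bool) (p : String × List String) : List (String × List String) := [(p.1, pvCap test p.2)]

def pvStepA (test background : Bool) (processes : List (List (String × List String))) (inputFile : String) :
    List (List (String × List String)) :=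
  if (((PySem.List.enumerate processes).filter
      (fun p => (PySem.Dict.mk p.2).contains (pvProcOf inputFile background))).map (·.1)).length == 0 then
    processes ++ [[(pvProcOf inputFile background, [inputFile])]]
  else
    if !test || ((PySem.Dict.mk (PySem.List.pyGetD processes
        (PySem.List.pyGetD (((PySem.List.enumerate processes).filter
          (fun p => (PySem.Dict.mk p.2).contains (pvProcOf inputFile background))).map (·.1)) 0 0)
        [])).getD (pvProcOf inputFile background) []).length < 30 then
      PySem.List.pySetD processes
        (PySem.List.pyGetD (((PySem.List.enumerate processes).filter
          (fun p => (PySem.Dict.mk p.2).contains (pvProcOf inputFile background))).map (·.1)) 0 0)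
        (((PySem.Dict.mk (PySem.List.pyGetD processes
          (PySem.List.pyGetD (((PySem.List.enumerate processes).filter
            (fun p => (PySem.Dict.mk p.2).contains (pvProcOf inputFile background))).map (·.1)) 0 0)
          [])).modify (pvProcOf inputFile background) [] (fun fs => fs ++ [inputFile])).items)
    else processes

def pvStepB (background : Bool) (g : PySem.Dict String (List String)) (inputFile : String) :
    PySem.Dict String (List String) :=
  g.modify (pvProcOf inputFile background) [] (fun fs => fs ++ [inputFile])

def pvOrder (l : List String) : List String :=
  l.foldl (fun acc p => if acc.contains p then acc else acc ++ [p]) []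

lemma pvA_eq (inputFiles : List String) (test background : Bool) :
    splitByProcess inputFiles test background = inputFiles.foldl (pvStepA test background) [] := rfl

lemma pvCap_append (test : Bool) (v : List String) (f : String) :
    pvCap test (v ++ [f]) =
      if !test || (pvCap test v).length < 30 then pvCap test v ++ [f] else pvCap test v := by
  cases test
  · simp [pvCap]
  · simp only [pvCap, if_true, Bool.not_true, Bool.false_or, List.length_take]
    by_cases h : v.length < 30
    · rw [if_pos (by simpa using (by omega : min 30 v.length < 30)),
        List.take_of_length_le (by simp; omega), List.take_of_length_le (by omega)]
    · rw [if_neg (by simp; omega), List.take_append_of_le_length (by omega)]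

-- the alreadyFound list over the wrapped image, start generalized
lemma pvFound (test : Bool) (p : String) (L : List (String × List String)) (s : Int)
    (h : (L.map Prod.fst).Nodup) :
    ((PySem.List.enumerate (L.map (pvWrap test)) s).filter
        (fun q => (PySem.Dict.mk q.2).contains p)).map (·.1) =
      if p ∈ L.map Prod.fst then [s + ((L.map Prod.fst).idxOf p : Int)] else [] := by
  induction L generalizing s with
  | nil => simp
  | cons q L ih =>
    rw [List.map_cons] at h
    have h1 : q.1 ∉ L.map Prod.fst := (List.nodup_cons.mp h).1
    have h2 : (L.map Prod.fst).Nodup := (List.nodup_cons.mp h).2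
    simp only [List.map_cons, PySem.List.enumerate_cons, List.filter_cons]
    by_cases hq : q.1 = p
    · subst hq
      have hcont : (PySem.Dict.mk (pvWrap test q)).contains q.1 = true := by
        simp [pvWrap]
      rw [hcont, if_pos rfl, if_pos (List.mem_cons_self), List.map_cons,
        ih (s + 1) h2, if_neg h1, List.idxOf_cons_self]
      simp
    · have hcont : (PySem.Dict.mk (pvWrap test q)).contains p = false := by
        simp [pvWrap]
        exact hq
      rw [hcont, if_neg (by simp), ih (s + 1) h2]
      by_cases hp : p ∈ L.map Prod.fst
      · rw [if_pos hp, if_pos (List.mem_cons_of_mem _ hp), List.idxOf_cons_ne _ hq]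
        push_cast
        ring_nf
      · rw [if_neg hp, if_neg (by
          intro hm
          rcases List.mem_cons.mp hm with h9 | h9
          · exact hq h9.symm
          · exact hp h9)]

lemma pv_map_ite_eq_set (L : List (String × List String)) (p : String) (v' : List String)
    (h : (L.map Prod.fst).Nodup) (hp : p ∈ L.map Prod.fst) :
    L.map (fun q => if q.1 == p then (p, v') else q) =
      L.set ((L.map Prod.fst).idxOf p) (p, v') := by
  induction L with
  | nil => simp
  | cons q L ih =>
    rw [List.map_cons] at h
    have h1 : q.1 ∉ L.map Prod.fst := (List.nodup_cons.mp h).1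
    have h2 : (L.map Prod.fst).Nodup := (List.nodup_cons.mp h).2
    by_cases hq : q.1 = p
    · subst hq
      simp only [List.map_cons, beq_self_eq_true, if_true, List.idxOf_cons_self, List.set_cons_zero]
      congr 1
      refine (List.map_congr_left ?_).trans (List.map_id L)
      intro a ha
      have hne : (a.1 == q.1) = false := by
        simp only [beq_eq_false_iff_ne, ne_eq]
        exact fun hh => h1 (hh ▸ List.mem_map_of_mem ha)
      simp [hne]
    · rw [List.map_cons] at hp
      have hp' : p ∈ L.map Prod.fst := by
        rcases List.mem_cons.mp hp with h9 | h9
        · exact absurd h9.symm hq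
        · exact h9
      simp only [List.map_cons]
      rw [List.idxOf_cons_ne _ hq, List.set_cons_succ,
        if_neg (by simp [hq]), ih h2 hp']

lemma pvSingletonGetD (p : String) (w : List String) : (PySem.Dict.mk [(p, w)]).getD p [] = w := by
  simp [PySem.Dict.getD_eq_get?_getD, PySem.Dict.get?_mk_cons]

lemma pvSingletonModify (p : String) (w : List String) (f : String) :
    ((PySem.Dict.mk [(p, w)]).modify p [] (fun fs => fs ++ [f])).items = [(p, w ++ [f])] := by
  simp [PySem.Dict.modify, PySem.Dict.insert, PySem.Dict.getD, PySem.Dict.get?]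

lemma pvStep_eq (test background : Bool) (f : String) (g : PySem.Dict String (List String))
    (h : g.keys.Nodup) :
    pvStepA test background (g.items.map (pvWrap test)) f =
      (pvStepB background g f).items.map (pvWrap test) := by
  have hnd : (g.items.map Prod.fst).Nodup := h
  unfold pvStepA
  rw [pvFound test (pvProcOf f background) g.items 0 hnd]
  by_cases hp : pvProcOf f background ∈ g.items.map Prod.fst
  · -- the process already has an entry
    have hlt' : (g.items.map Prod.fst).idxOf (pvProcOf f background) < (g.items.map Prod.fst).length :=
      List.idxOf_lt_length_of_mem hp
    have hlt : (g.items.map Prod.fst).idxOf (pvProcOf f background) < g.items.length := by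
      simpa using hlt'
    have hkey : (g.items[(g.items.map Prod.fst).idxOf (pvProcOf f background)]'hlt).1
        = pvProcOf f background := by
      have h5 := List.getElem_idxOf hlt'
      rw [List.getElem_map] at h5
      exact h5
    rw [if_pos hp]
    show (if !test || ((PySem.Dict.mk (PySem.List.pyGetD (g.items.map (pvWrap test))
          (0 + ((g.items.map Prod.fst).idxOf (pvProcOf f background) : Int)) [])).getD
          (pvProcOf f background) []).length < 30 then
        PySem.List.pySetD (g.items.map (pvWrap test))
          (0 + ((g.items.map Prod.fst).idxOf (pvProcOf f background) : Int))
          (((PySem.Dict.mk (PySem.List.pyGetD (g.items.map (pvWrap test))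
            (0 + ((g.items.map Prod.fst).idxOf (pvProcOf f background) : Int)) [])).modify
            (pvProcOf f background) [] (fun fs => fs ++ [f])).items)
      else g.items.map (pvWrap test)) = _
    rw [zero_add, PySem.List.pyGetD_natCast, PySem.List.pySetD_natCast,
      List.getD_eq_getElem _ _ (by simpa using hlt), List.getElem_map]
    simp only [pvWrap, hkey, pvSingletonGetD, pvSingletonModify]
    -- B side
    have hmem : (pvProcOf f background,
        (g.items[(g.items.map Prod.fst).idxOf (pvProcOf f background)]'hlt).2) ∈ g.items := by
      have : (pvProcOf f background,
          (g.items[(g.items.map Prod.fst).idxOf (pvProcOf f background)]'hlt).2)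
            = g.items[(g.items.map Prod.fst).idxOf (pvProcOf f background)]'hlt := by
        exact Prod.ext hkey.symm rfl
      rw [this]
      exact List.getElem_mem hlt
    have hgv : g.getD (pvProcOf f background) []
        = (g.items[(g.items.map Prod.fst).idxOf (pvProcOf f background)]'hlt).2 :=
      PySem.Dict.getD_of_mem_items g hmem h []
    have hcont : g.contains (pvProcOf f background) = true :=
      (PySem.Dict.contains_iff_mem_keys g _).mpr (by simpa [PySem.Dict.keys] using hp)
    have hBitems : (pvStepB background g f).items = g.items.set ((g.items.map Prod.fst).idxOf (pvProcOf f background))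
        (pvProcOf f background, (g.items[(g.items.map Prod.fst).idxOf (pvProcOf f background)]'hlt).2 ++ [f]) := by
      show (g.insert (pvProcOf f background) (g.getD (pvProcOf f background) [] ++ [f])).items = _
      rw [hgv, PySem.Dict.items_insert_of_contains g _ hcont]
      exact pv_map_ite_eq_set g.items _ _ hnd hp
    rw [hBitems, List.map_set]
    simp only [pvWrap, pvCap_append]
    by_cases hc : (!test || decide ((pvCap test
        (g.items[(g.items.map Prod.fst).idxOf (pvProcOf f background)]'hlt).2).length < 30)) = true
    · rw [if_pos hc, if_pos hc]
    · rw [if_neg (by simpa using hc), if_neg (by simpa using hc)]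
      have hidx : ([(pvProcOf f background, pvCap test
          (g.items[(g.items.map Prod.fst).idxOf (pvProcOf f background)]'hlt).2)])
          = (g.items.map (pvWrap test))[(g.items.map Prod.fst).idxOf (pvProcOf f background)]'(by simpa using hlt) := by
        rw [List.getElem_map]
        simp [pvWrap, hkey]
      rw [hidx, List.set_getElem_self]
  · -- new process: appended at the end on both sides
    rw [if_neg hp]
    show List.map (pvWrap test) g.items ++ [[(pvProcOf f background, [f])]]
      = (pvStepB background g f).items.map (pvWrap test)
    have hcont : g.contains (pvProcOf f background) = false := by
      rw [PySem.Dict.contains_eq_decide_mem_keys]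
      simpa [PySem.Dict.keys] using hp
    have hB : pvStepB background g f = g.insert (pvProcOf f background) [f] := by
      show g.insert _ (g.getD _ [] ++ [f]) = _
      rw [PySem.Dict.getD_of_not_contains g _ hcont]
      rfl
    rw [hB, PySem.Dict.items_insert_of_not_contains g _ hcont]
    cases test <;> simp [pvWrap, pvCap]

lemma pvStepB_nodup (background : Bool) (f : String) (g : PySem.Dict String (List String))
    (h : g.keys.Nodup) : (pvStepB background g f).keys.Nodup := by
  have heq : pvStepB background g f = g.insert (pvProcOf f background)
      ((g.getD (pvProcOf f background) []) ++ [f]) := rfl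
  rw [heq]
  exact PySem.Dict.nodup_keys_insert _ _ _ h

lemma pvFoldl_inv (test background : Bool) (fs : List String) :
    ∀ g : PySem.Dict String (List String), g.keys.Nodup →
      fs.foldl (pvStepA test background) (g.items.map (pvWrap test)) =
        (fs.foldl (pvStepB background) g).items.map (pvWrap test) := by
  induction fs with
  | nil => intro g _; rfl
  | cons f fs ih =>
    intro g hg
    simp only [List.foldl_cons]
    rw [pvStep_eq test background f g hg]
    exact ih _ (pvStepB_nodup background f g hg)

lemma pvG_nodup (background : Bool) (fs : List String) :
    ((fs.foldl (pvStepB background) PySem.Dict.empty).keys).Nodup := by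
  induction fs using List.reverseRecOn with
  | nil => exact PySem.Dict.nodup_keys_empty
  | append_singleton fs f ih =>
    rw [List.foldl_append]
    exact pvStepB_nodup background f _ ih

lemma pvMem_pvOrder (l : List String) (x : String) (hx : x ∈ l) : x ∈ pvOrder l := by
  have key : ∀ (l : List String) (acc : List String), x ∈ acc ∨ x ∈ l →
      x ∈ l.foldl (fun acc p => if acc.contains p then acc else acc ++ [p]) acc := by
    intro l
    induction l with
    | nil => intro acc h; simpa using h.resolve_right (by simp)
    | cons p l ih =>
      intro acc h
      simp only [List.foldl_cons]
      by_cases hc : p ∈ acc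
      · rw [if_pos (by simpa using hc)]
        refine ih acc ?_
        rcases h with h | h
        · exact Or.inl h
        · rcases List.mem_cons.mp h with h | h
          · exact Or.inl (h ▸ hc)
          · exact Or.inr h
      · rw [if_neg (by simpa using hc)]
        refine ih (acc ++ [p]) ?_
        rcases h with h | h
        · exact Or.inl (List.mem_append_left _ h)
        · rcases List.mem_cons.mp h with h | h
          · exact Or.inl (by simp [h])
          · exact Or.inr h
  exact key l [] (Or.inr hx)

-- the dict fold is exactly pvOrder + one filter per distinct process
lemma pvG_items (background : Bool) (fs : List String) :
    (fs.foldl (pvStepB background) PySem.Dict.empty).items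
      = (pvOrder (fs.map (fun f => pvProcOf f background))).map
          (fun p => (p, fs.filter (fun f => pvProcOf f background == p))) := by
  induction fs using List.reverseRecOn with
  | nil => rfl
  | append_singleton fs f ih =>
    rw [List.foldl_append, List.foldl_cons, List.foldl_nil]
    set g := fs.foldl (pvStepB background) PySem.Dict.empty with hg
    set p := pvProcOf f background with hpdef
    have hnd : g.keys.Nodup := pvG_nodup background fs
    have hkeys : g.keys = pvOrder (fs.map (fun f => pvProcOf f background)) := by
      show g.items.map Prod.fst = _
      rw [ih, List.map_map]
      exact (List.map_congr_left (fun a _ => rfl)).trans (List.map_id _)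
    have horder : pvOrder ((fs ++ [f]).map (fun f => pvProcOf f background))
        = if (pvOrder (fs.map (fun f => pvProcOf f background))).contains p
          then pvOrder (fs.map (fun f => pvProcOf f background))
          else pvOrder (fs.map (fun f => pvProcOf f background)) ++ [p] := by
      rw [List.map_append]
      show List.foldl _ [] (_ ++ [p]) = _
      rw [List.foldl_append]
      rfl
    have hfilter : ∀ q : String, (fs ++ [f]).filter (fun f' => pvProcOf f' background == q)
        = fs.filter (fun f' => pvProcOf f' background == q) ++ (if p == q then [f] else []) := by
      intro q
      rw [List.filter_append]
      congr 1
      simp only [List.filter_cons, List.filter_nil]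
      rfl
    by_cases hc : g.contains p
    · -- existing process
      have hmemO : p ∈ pvOrder (fs.map (fun f => pvProcOf f background)) := by
        rw [← hkeys]
        exact (PySem.Dict.contains_iff_mem_keys g p).mp hc
      have hmemI : (p, fs.filter (fun f' => pvProcOf f' background == p)) ∈ g.items := by
        rw [ih]; exact List.mem_map_of_mem hmemO
      have hgv : g.getD p [] = fs.filter (fun f' => pvProcOf f' background == p) :=
        PySem.Dict.getD_of_mem_items g hmemI hnd []
      have hstep : pvStepB background g f
          = g.insert p (fs.filter (fun f' => pvProcOf f' background == p) ++ [f]) := by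
        show g.insert p (g.getD p [] ++ [f]) = _
        rw [hgv]
      rw [hstep, PySem.Dict.items_insert_of_contains g _ hc, ih, List.map_map,
        horder, if_pos (by simpa using hmemO)]
      refine List.map_congr_left ?_
      intro q hq
      rw [hfilter q]
      by_cases hqp : q = p
      · subst hqp; simp
      · have : (p == q) = false := by
          simp only [beq_eq_false_iff_ne, ne_eq]
          exact fun hh => hqp hh.symm
        simp only [Function.comp_apply, this, if_neg, List.append_nil]
        have : (q == p) = false := by simp [hqp]
        simp [this]
    · -- new process
      have hnmemO : p ∉ pvOrder (fs.map (fun f => pvProcOf f background)) := by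
        rw [← hkeys]
        intro hm
        exact hc ((PySem.Dict.contains_iff_mem_keys g p).mpr hm)
      have hstep : pvStepB background g f = g.insert p [f] := by
        show g.insert p (g.getD p [] ++ [f]) = _
        rw [PySem.Dict.getD_of_not_contains g _ (by simpa using hc)]
        rfl
      have hfnil : fs.filter (fun f' => pvProcOf f' background == p) = [] := by
        rw [List.filter_eq_nil_iff]
        intro f' hf' hh
        have hEq : pvProcOf f' background = p := by simpa using hh
        exact hnmemO (hEq ▸ pvMem_pvOrder _ _ (List.mem_map_of_mem hf'))
      rw [hstep, PySem.Dict.items_insert_of_not_contains g _ (by simpa using hc), ih,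
        horder, if_neg (by simpa [List.contains_iff_mem] using hnmemO), List.map_append]
      congr 1
      · refine List.map_congr_left ?_
        intro q hq
        rw [hfilter q]
        have : (p == q) = false := by
          simp only [beq_eq_false_iff_ne, ne_eq]
          intro hh; exact hnmemO (hh ▸ hq)
        simp [this]
      · rw [List.map_singleton, hfilter p, hfnil]
        simp

-- zip with the mapped list, filter on the second component, project: a plain filter
lemma pvZipFilter (xs : List String) (g : String → String) (p : String) :
    (((xs.zip (xs.map g)).filter (fun fq => fq.2 == p)).map Prod.fst)
      = xs.filter (fun x => g x == p) := by
  induction xs with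
  | nil => rfl
  | cons x xs ih =>
    simp only [List.map_cons, List.zip_cons_cons, List.filter_cons]
    by_cases h : (g x == p) = true
    · simp [h, ih]
    · simp [h, ih]

-- ===== VERDICT (by name: the statement is the Claim_ definition above) =====
theorem splitByProcess_spec : Claim_equal_splitByProcess := by
  intro inputFiles test background _
  unfold Spec_splitByProcess
  rw [pvA_eq]
  have h0 : ([] : List (List (String × List String))) =
      (PySem.Dict.empty : PySem.Dict String (List String)).items.map (pvWrap test) := rfl
  rw [h0, pvFoldl_inv test background inputFiles PySem.Dict.empty PySem.Dict.nodup_keys_empty,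
    pvG_items]
  show _ = splitByProcess_alt inputFiles test background
  unfold splitByProcess_alt
  rw [List.map_map]
  refine List.map_congr_left ?_
  intro p _
  simp only [Function.comp_apply, pvWrap, pvCap, pvZipFilter]
  cases test
  · have hlim : (if (false : Bool) = true then (30 : Int) else (inputFiles.length : Int))
        = ((inputFiles.length : Nat) : Int) := by simp
    rw [hlim, PySem.List.slice_to_natCast,
      List.take_of_length_le (List.length_filter_le _ _)]
    simp
  · have hlim : (if (true : Bool) = true then (30 : Int) else (inputFiles.length : Int))
        = ((30 : Nat) : Int) := by norm_num
    rw [hlim, PySem.List.slice_to_natCast]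
    simp
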